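-- pv_equiv track=rewrite | github.com/hazemalsaied/NNIdentSys | bist-parser/Marie/src/DepGraph.py | is_segment_contiguous
-- ===== SOURCE A (Python) =====
-- def is_segment_contiguous(lidxs):
--     """ Returns True if the set of lidxs contains a contiguous sequence of lidxs
--     @param lidxs : set of lidxs
--     """
--     local = sorted(lidxs.copy())
--     prev = local.pop(0)
--     while local:
--         next = local.pop(0)
--         if next > prev + 1:
--             return False
--         prev = next
--     return True
-- ===== SOURCE B (Python) =====
-- def is_segment_contiguous(lidxs):
--     """ Returns True if the set of lidxs contains a contiguous sequence of lidxs
--     @param lidxs : set of lidxs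
--     """
--     local = sorted(lidxs)
--     return local[-1] - local[0] + 1 == len(set(local))
-- ===== Notes on version B (the rewrite author's own statement) =====
-- stated objective: alternative
-- what changed: Replaces the sequential gap-scan over the sorted list (pop the head, compare each neighbour pair) with a counting identity: the indices are contiguous iff last-of-sorted minus first-of-sorted plus one equals the number of distinct values.
import Mathlib
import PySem

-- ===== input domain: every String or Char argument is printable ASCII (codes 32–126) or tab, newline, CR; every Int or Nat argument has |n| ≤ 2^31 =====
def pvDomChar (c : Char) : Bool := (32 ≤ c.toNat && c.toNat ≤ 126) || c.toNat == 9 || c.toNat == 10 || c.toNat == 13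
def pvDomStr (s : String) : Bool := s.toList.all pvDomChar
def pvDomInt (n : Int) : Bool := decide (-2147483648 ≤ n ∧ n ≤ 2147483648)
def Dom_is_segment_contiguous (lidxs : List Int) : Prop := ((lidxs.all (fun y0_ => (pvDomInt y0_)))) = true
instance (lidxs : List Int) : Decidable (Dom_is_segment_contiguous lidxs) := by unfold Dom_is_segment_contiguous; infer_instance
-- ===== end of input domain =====

-- B replaces A's sequential gap-scan over the sorted list with the counting identity
-- max - min + 1 == number of distinct values (objective: alternative algorithm, same cost).

-- ===== PORT A =====
-- the while-loop of A: 'prev' is the last popped element, the list argument is what remains of 'local'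
def pvLoopA : Int → List Int → Bool
  | _, [] => true
  | prev, next :: rest => if next > prev + 1 then false else pvLoopA next rest

def is_segment_contiguous (lidxs : List Int) : Bool :=
  -- local = sorted(lidxs.copy()); prev = local.pop(0)  (pop on [] raises IndexError: excluded by Pre_)
  match PySem.List.sorted lidxs (fun x => x) false with
  | [] => false
  | prev :: rest => pvLoopA prev rest

-- ===== PORT B =====
def is_segment_contiguous_alt (lidxs : List Int) : Bool :=
  let loc := PySem.List.sorted lidxs (fun x => x) false
  -- local[-1], local[0] raise IndexError on the empty list: excluded by Pre_
  match PySem.List.pyGet? loc (-1), PySem.List.pyGet? loc 0 with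
  | some hi, some lo => decide (hi - lo + 1 = PySem.Set.len (PySem.Set.ofList loc))
  | _, _ => false

-- ===== PRECONDITION & SPEC =====
-- Pre_ excludes exactly the empty list, on which both A and B raise IndexError.
def Pre_is_segment_contiguous (lidxs : List Int) : Prop := lidxs ≠ []
instance (lidxs : List Int) : Decidable (Pre_is_segment_contiguous lidxs) := by unfold Pre_is_segment_contiguous; infer_instance
def pvWitness_is_segment_contiguous : List Int := [3, 1, 2]

def Spec_is_segment_contiguous (lidxs : List Int) (out : Bool) : Prop := out = is_segment_contiguous_alt lidxs
instance (lidxs : List Int) (out : Bool) : Decidable (Spec_is_segment_contiguous lidxs out) := by unfold Spec_is_segment_contiguous; infer_instance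

-- ===== CLAIM (what is proved, stated in full; the proofs are below) =====
def Claim_equal_is_segment_contiguous : Prop := ∀ (lidxs : List Int), Dom_is_segment_contiguous lidxs → Pre_is_segment_contiguous lidxs → Spec_is_segment_contiguous lidxs (is_segment_contiguous lidxs)

-- ===== LEMMAS AND PROOFS =====

-- A's gap-scan succeeds iff every value between the head and the last element occurs in the list
lemma pv_loop_iff (a : Int) (rest : List Int) (hp : (a :: rest).Pairwise (· ≤ ·)) :
    pvLoopA a rest = true ↔
      ∀ x : Int, a ≤ x → x ≤ (a :: rest).getLast (by simp) → x ∈ a :: rest := by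
  induction rest generalizing a with
  | nil =>
    simp only [pvLoopA, List.getLast_singleton, true_iff]
    intro x h1 h2
    have : x = a := le_antisymm h2 h1
    simp [this]
  | cons b u ih =>
    rcases List.pairwise_cons.mp hp with ⟨hafter, ht⟩
    have hab : a ≤ b := hafter b (by simp)
    have hlast : (a :: b :: u).getLast (by simp) = (b :: u).getLast (by simp) :=
      List.getLast_cons (by simp)
    have hbL : b ≤ (b :: u).getLast (by simp) :=
      List.Pairwise.rel_getLast ht (List.mem_cons_self ..)
    by_cases hgap : b > a + 1
    · simp only [pvLoopA, if_pos hgap, Bool.false_eq_true, false_iff]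
      intro H
      have hmem := H (a + 1) (by omega) (by rw [hlast]; omega)
      rcases List.mem_cons.mp hmem with h1 | h2
      · omega
      · have : b ≤ a + 1 := List.Pairwise.rel_head ht h2
        omega
    · rw [show pvLoopA a (b :: u) = pvLoopA b u by simp [pvLoopA, hgap]]
      rw [ih b ht]
      constructor
      · intro H x h1 h2
        rw [hlast] at h2
        by_cases hxa : x = a
        · simp [hxa]
        · have hx : a + 1 ≤ x := by omega
          exact List.mem_cons_of_mem a (H x (by omega) h2)
      · intro H x h1 h2
        have hmem := H x (by omega) (by rw [hlast]; exact h2)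
        rcases List.mem_cons.mp hmem with hxa | hxu
        · have : x = b := by omega
          simp [this]
        · exact hxu

theorem pv_main (lidxs : List Int) (h : lidxs ≠ []) :
    is_segment_contiguous lidxs = is_segment_contiguous_alt lidxs := by
  unfold is_segment_contiguous is_segment_contiguous_alt
  cases hsl : PySem.List.sorted lidxs (fun x => x) false with
  | nil =>
    have hperm := PySem.List.sorted_perm lidxs (fun x => x) false
    rw [hsl] at hperm
    exact absurd hperm.nil_eq.symm h
  | cons a rest =>
    have hp : (a :: rest).Pairwise (· ≤ ·) := by
      have := PySem.List.sorted_pairwise lidxs (fun x => x) (κ := Int)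
      rw [hsl] at this
      exact this
    have hne : (a :: rest) ≠ [] := by simp
    set L := (a :: rest).getLast hne with hL
    have hget0 : PySem.List.pyGet? (a :: rest) 0 = some a := PySem.List.pyGet?_zero_cons ..
    have hgetN : PySem.List.pyGet? (a :: rest) (-1) = some L := by
      rw [PySem.List.pyGet?_neg_one, List.getLast?_eq_some_getLast hne]
    change pvLoopA a rest =
      (match PySem.List.pyGet? (a :: rest) (-1), PySem.List.pyGet? (a :: rest) 0 with
        | some hi, some lo => decide (hi - lo + 1 = PySem.Set.len (PySem.Set.ofList (a :: rest)))
        | _, _ => false)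
    rw [hget0, hgetN]
    have haL : a ≤ L := List.Pairwise.rel_getLast hp (List.mem_cons_self ..)
    -- the distinct elements, and the full expected range
    set S : List Int := PySem.Set.ofList (a :: rest) with hS
    set R : List Int := PySem.List.pyRange a (L + 1) 1 with hR
    have hSsub : S ⊆ R := by
      intro x hx
      have hx' : x ∈ a :: rest := (PySem.Set.mem_ofList _ _).mp hx
      have h1 : a ≤ x := List.Pairwise.rel_head hp hx'
      have h2 : x ≤ L := List.Pairwise.rel_getLast hp hx'
      exact PySem.List.mem_pyRange_one.mpr ⟨h1, by omega⟩
    have hSsp : S.Subperm R := List.subperm_of_subset (hS ▸ PySem.Set.nodup_ofList (a :: rest)) hSsub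
    have hRlen : R.length = (L + 1 - a).toNat := PySem.List.length_pyRange_one ..
    -- the range is contained in the list exactly when the lengths agree
    have key : (∀ x : Int, a ≤ x → x ≤ L → x ∈ a :: rest) ↔ (L - a + 1 = PySem.Set.len S) := by
      constructor
      · intro H
        have hRsub : R ⊆ S := by
          intro x hx
          rcases PySem.List.mem_pyRange_one.mp hx with ⟨h1, h2⟩
          exact (PySem.Set.mem_ofList _ _).mpr (H x h1 (by omega))
        have hRsp : R.Subperm S := List.subperm_of_subset (PySem.List.nodup_pyRange_one ..) hRsub
        have := hSsp.length_le
        have := hRsp.length_le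
        simp only [PySem.Set.len]
        omega
      · intro H x h1 h2
        have hlen : R.length ≤ S.length := by
          simp only [PySem.Set.len] at H
          omega
        have hperm : S.Perm R := hSsp.perm_of_length_le hlen
        have : x ∈ S := (hperm.mem_iff).mpr (PySem.List.mem_pyRange_one.mpr ⟨h1, by omega⟩)
        exact (PySem.Set.mem_ofList _ _).mp this
    rw [Bool.eq_iff_iff, pv_loop_iff a rest hp, decide_eq_true_iff]
    exact key

-- ===== VERDICT (by name: the statement is the Claim_ definition above) =====
theorem is_segment_contiguous_spec : Claim_equal_is_segment_contiguous := by
  intro lidxs _ hpre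
  unfold Spec_is_segment_contiguous
  exact pv_main lidxs hpre
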